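-- pv_equiv track=rewrite | github.com/leemanbokgoo/codingProblem | pythonAnswer/array/arrayPartition.py | solution
-- ===== SOURCE A (Python) =====
-- from typing import List
--
-- def solution( nums : List[int]) -> List[List[int]]:
--
--     nums.sort()
--     array = []
--     sum = 0
--
--     for num in nums:
--         array.append(num)
--         if len(array) == 2:
--             sum += min(array[0], array[1]) # min(array)
--             array.clear() # array = []
--     return sum
-- ===== SOURCE B (Python) =====
-- from typing import List
--
-- def solution(nums: List[int]) -> int:
--     # Sort in place (same mutation A performs), then take every even-indexed
--     # element: in a sorted list the min of each adjacent pair is its first element.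
--     nums.sort()
--     return sum(nums[i] for i in range(0, len(nums) - 1, 2))
-- ===== Notes on version B (the rewrite author's own statement) =====
-- stated objective: simpler
-- what changed: Replaces A's two-element buffer list, length test and min() call with a stride-2 sum over even indices of the sorted list, using that the min of each sorted adjacent pair is its first element.
import Mathlib
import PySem

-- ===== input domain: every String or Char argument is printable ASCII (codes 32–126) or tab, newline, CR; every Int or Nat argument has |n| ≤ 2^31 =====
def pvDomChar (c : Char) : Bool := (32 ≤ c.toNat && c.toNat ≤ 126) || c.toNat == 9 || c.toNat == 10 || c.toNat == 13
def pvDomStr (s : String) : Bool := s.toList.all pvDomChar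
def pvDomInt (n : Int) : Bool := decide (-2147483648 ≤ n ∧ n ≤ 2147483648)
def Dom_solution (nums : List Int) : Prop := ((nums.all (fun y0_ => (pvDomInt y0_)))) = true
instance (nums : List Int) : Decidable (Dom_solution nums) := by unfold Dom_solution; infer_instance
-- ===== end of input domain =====

-- B sums the even-indexed elements of the sorted list directly instead of keeping A's
-- two-element buffer and min() call (objective: simpler). Both A and B sort 'nums' in
-- place; the equivalence proved here is about the return value.

-- ===== PORT A =====
-- for num in nums: array.append(num); if len(array)==2: sum += min(array[0],array[1]); array.clear()
def solution (nums : List Int) : Int :=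
  let s := PySem.List.sorted nums (fun x => x) false
  (s.foldl
    (fun (st : List Int × Int) num =>
      let array := st.1 ++ [num]
      if array.length == 2 then
        ([], st.2 + min (PySem.List.pyGetD array 0 0) (PySem.List.pyGetD array 1 0))
      else
        (array, st.2))
    ([], 0)).2

-- ===== PORT B =====
-- nums.sort(); return sum(nums[i] for i in range(0, len(nums)-1, 2))
-- (indices produced by range are always in range, so pyGetD with default 0 is exact)
def solution_alt (nums : List Int) : Int :=
  let s := PySem.List.sorted nums (fun x => x) false
  (PySem.List.pyRange 0 ((s.length : Int) - 1) 2).foldl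
    (fun acc i => acc + PySem.List.pyGetD s i 0) 0

-- ===== PRECONDITION & SPEC =====
def Spec_solution (nums : List Int) (out : Int) : Prop := out = solution_alt nums
instance (nums : List Int) (out : Int) : Decidable (Spec_solution nums out) := by unfold Spec_solution; infer_instance

-- ===== CLAIM (what is proved, stated in full; the proofs are below) =====
def Claim_equal_solution : Prop := ∀ (nums : List Int), Dom_solution nums → Spec_solution nums (solution nums)

-- ===== LEMMAS AND PROOFS =====

-- the body of A's loop (definitionally the lambda in 'solution')
def stepA (st : List Int × Int) (num : Int) : List Int × Int :=
  let array := st.1 ++ [num]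
  if array.length == 2 then
    ([], st.2 + min (PySem.List.pyGetD array 0 0) (PySem.List.pyGetD array 1 0))
  else
    (array, st.2)

-- sum of min of adjacent pairs (characterises A's loop)
def pairMin : List Int → Int
  | [] => 0
  | [_] => 0
  | a :: b :: t => min a b + pairMin t

-- sum of first elements of adjacent pairs (characterises B's loop)
def pairFst : List Int → Int
  | [] => 0
  | [_] => 0
  | a :: _ :: t => a + pairFst t

theorem pairMin_eq_pairFst (l : List Int) (h : l.Pairwise (fun a b => a ≤ b)) :
    pairMin l = pairFst l := by
  induction l using pairMin.induct with
  | case1 => rfl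
  | case2 => rfl
  | case3 a b t ih =>
    simp only [List.pairwise_cons] at h
    have hab : a ≤ b := h.1 b (by simp)
    simp [pairMin, pairFst, min_eq_left hab, ih h.2.2]

-- A's loop, from the empty buffer and from a one-element buffer
theorem A_loop (l : List Int) :
    (∀ s : Int, (l.foldl stepA ([], s)).2 = s + pairMin l) ∧
    (∀ (x s : Int), (l.foldl stepA ([x], s)).2 = s + pairMin (x :: l)) := by
  induction l with
  | nil => exact ⟨fun s => by simp [pairMin], fun x s => by simp [pairMin]⟩
  | cons a t ih =>
    constructor
    · intro s
      have hstep : stepA ([], s) a = ([a], s) := by simp [stepA]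
      simp only [List.foldl_cons, hstep]
      exact ih.2 a s
    · intro x s
      have hstep : stepA ([x], s) a = ([], s + min x a) := by
        simp [stepA, PySem.List.pyGetD_ofNat']
      simp only [List.foldl_cons, hstep]
      rw [ih.1 (s + min x a)]
      simp [pairMin]
      ring

-- the step-2 range over [0, n+1) with n ≥ 0 is 0 followed by the shifted range over [0, n-1)
theorem pyRange_two_cons (n : Int) (hn : 0 ≤ n) :
    PySem.List.pyRange 0 (n + 1) 2 =
      0 :: (PySem.List.pyRange 0 (n - 1) 2).map (· + 2) := by
  rw [PySem.List.pyRange_of_pos _ _ (by norm_num),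
      PySem.List.pyRange_of_pos _ _ (by norm_num : (0:Int) < 2)]
  have h1 : (0:Int) < n + 1 := by omega
  simp only [if_pos h1]
  have hcount : ((n + 1 - 0 + 2 - 1) / 2).toNat =
      (if (0:Int) < n - 1 then ((n - 1 - 0 + 2 - 1) / 2).toNat else 0) + 1 := by
    split_ifs with h2
    · have : (n + 2) / 2 = n / 2 + 1 := by omega
      omega
    · omega
  rw [hcount, List.range_succ_eq_map]
  simp [List.map_map, Function.comp]
  intro k _
  ring

-- B's range-fold computes pairFst
theorem B_loop (l : List Int) :
    (PySem.List.pyRange 0 ((l.length : Int) - 1) 2).foldl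
      (fun acc i => acc + PySem.List.pyGetD l i 0) 0 = pairFst l := by
  induction l using pairFst.induct with
  | case1 => simp [PySem.List.pyRange, pairFst]
  | case2 x => simp [PySem.List.pyRange, pairFst]
  | case3 a b t ih =>
    have hlen : ((a :: b :: t).length : Int) - 1 = (t.length : Int) + 1 := by
      simp
    rw [hlen, pyRange_two_cons _ (Int.natCast_nonneg _)]
    simp only [List.foldl_cons, List.foldl_map]
    have hshift : ∀ (i : Int), i ∈ PySem.List.pyRange 0 ((t.length : Int) - 1) 2 →
        PySem.List.pyGetD (a :: b :: t) (i + 2) 0 = PySem.List.pyGetD t i 0 := by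
      intro i hi
      have hmem := (PySem.List.mem_pyRange_iff_of_pos (by norm_num : (0:Int) < 2) i).1 hi
      have hi0 : 0 ≤ i := hmem.1
      have e1 : i + 2 = ((i.toNat + 2 : Nat) : Int) := by omega
      have e2 : i = ((i.toNat : Nat) : Int) := by omega
      rw [e1, PySem.List.pyGetD_natCast]
      conv_rhs => rw [e2, PySem.List.pyGetD_natCast]
      rfl
    have hfold : ∀ (r : List Int) (acc : Int),
        (∀ i ∈ r, PySem.List.pyGetD (a :: b :: t) (i + 2) 0 = PySem.List.pyGetD t i 0) →
        r.foldl (fun acc i => acc + PySem.List.pyGetD (a :: b :: t) (i + 2) 0) acc =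
        r.foldl (fun acc i => acc + PySem.List.pyGetD t i 0) acc := by
      intro r
      induction r with
      | nil => intro acc _; rfl
      | cons j r ihr =>
        intro acc hh
        simp only [List.foldl_cons]
        rw [hh j (by simp), ihr _ (fun i hi => hh i (by simp [hi]))]
    rw [hfold _ _ hshift]
    have hgen : ∀ (r : List Int) (acc : Int),
        r.foldl (fun acc i => acc + PySem.List.pyGetD t i 0) acc =
        acc + r.foldl (fun acc i => acc + PySem.List.pyGetD t i 0) 0 := by
      intro r
      induction r with
      | nil => simp
      | cons j r ihr =>
        intro acc
        simp only [List.foldl_cons, zero_add]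
        rw [ihr (acc + _), ihr (PySem.List.pyGetD t j 0)]
        ring
    rw [hgen, ih]
    simp [pairFst, PySem.List.pyGetD_ofNat']

-- ===== VERDICT (by name: the statement is the Claim_ definition above) =====
theorem solution_spec : Claim_equal_solution := by
  intro nums _
  unfold Spec_solution
  have hA : solution nums =
      ((PySem.List.sorted nums (fun x => x) false).foldl stepA ([], 0)).2 := rfl
  rw [hA, (A_loop (PySem.List.sorted nums (fun x => x) false)).1 0, zero_add]
  unfold solution_alt
  rw [B_loop (PySem.List.sorted nums (fun x => x) false)]
  exact pairMin_eq_pairFst _ (PySem.List.sorted_pairwise nums (fun x => x))
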